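-- pv_equiv track=rewrite | github.com/epacuit/relation_properties | relation_properties.py | make_transitive
-- ===== SOURCE A (Python) =====
-- def make_transitive(X, R):
--     R_new = list()
--     for a in X:
--         for b in X:
--             for c in X:
--                 if (a, b) in R and (b,c) in R:
--                     R_new += [(a, b), (b, c), (a, c)]
--     return set(R_new)
-- ===== SOURCE B (Python) =====
-- def make_transitive(X, R):
--     Rset = set(R)
--     succ = {b: [c for c in X if (b, c) in Rset] for b in X}
--     out = []
--     for a in X:
--         for b in succ[a]:
--             for c in succ[b]:
--                 out += [(a, b), (b, c), (a, c)]
--     return set(out)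
-- ===== Notes on version B (the rewrite author's own statement) =====
-- stated objective: faster
-- what changed: Precompute a successor adjacency list per vertex (with R as a hash set) once, then walk only actual length-2 paths instead of testing every (a,b,c) triple against the list R.
import Mathlib
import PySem

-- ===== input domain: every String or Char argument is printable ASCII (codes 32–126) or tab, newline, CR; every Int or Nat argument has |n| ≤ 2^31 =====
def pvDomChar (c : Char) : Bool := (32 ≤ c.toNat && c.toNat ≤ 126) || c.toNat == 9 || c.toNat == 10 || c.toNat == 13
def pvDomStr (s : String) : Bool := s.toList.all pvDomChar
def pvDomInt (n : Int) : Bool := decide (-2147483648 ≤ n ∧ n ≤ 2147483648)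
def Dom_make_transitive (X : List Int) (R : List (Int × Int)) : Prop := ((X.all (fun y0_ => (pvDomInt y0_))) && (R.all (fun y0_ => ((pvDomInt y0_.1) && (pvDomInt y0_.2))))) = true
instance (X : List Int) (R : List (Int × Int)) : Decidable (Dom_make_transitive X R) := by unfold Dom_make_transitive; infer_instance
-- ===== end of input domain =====

-- B replaces A's triple loop over X with membership tests against the list R by a
-- precomputed successor adjacency list per vertex, walking only actual length-2 paths (faster).

-- ===== PORT A =====
def make_transitive (X : List Int) (R : List (Int × Int)) : List (Int × Int) :=
  let R_new : List (Int × Int) :=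
    X.foldl (fun acc a =>
      X.foldl (fun acc b =>
        X.foldl (fun acc c =>
          if (a, b) ∈ R ∧ (b, c) ∈ R then acc ++ [(a, b), (b, c), (a, c)] else acc) acc) acc) []
  PySem.Set.ofList R_new

-- ===== PORT B =====
def make_transitive_alt (X : List Int) (R : List (Int × Int)) : List (Int × Int) :=
  let Rset : PySem.Set (Int × Int) := PySem.Set.ofList R
  let succ : PySem.Dict Int (List Int) :=
    X.foldl (fun d b => d.insert b (X.filter (fun c => decide ((b, c) ∈ Rset)))) PySem.Dict.empty
  let out : List (Int × Int) :=
    X.foldl (fun acc a =>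
      (succ.getD a []).foldl (fun acc b =>
        (succ.getD b []).foldl (fun acc c =>
          acc ++ [(a, b), (b, c), (a, c)]) acc) acc) []
  PySem.Set.ofList out

-- ===== PRECONDITION & SPEC =====
def Spec_make_transitive (X : List Int) (R : List (Int × Int)) (out : List (Int × Int)) : Prop := out = make_transitive_alt X R
instance (X : List Int) (R : List (Int × Int)) (out : List (Int × Int)) : Decidable (Spec_make_transitive X R out) := by unfold Spec_make_transitive; infer_instance

-- ===== CLAIM (what is proved, stated in full; the proofs are below) =====
def Claim_equal_make_transitive : Prop := ∀ (X : List Int) (R : List (Int × Int)), Dom_make_transitive X R → Spec_make_transitive X R (make_transitive X R)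

-- ===== LEMMAS AND PROOFS =====

theorem pv_foldl_congr {α β : Type} (l : List β) (f g : α → β → α) (init : α)
    (h : ∀ acc, ∀ x ∈ l, f acc x = g acc x) : l.foldl f init = l.foldl g init := by
  induction l generalizing init with
  | nil => rfl
  | cons x t ih =>
    simp only [List.foldl_cons]
    rw [h init x (by simp)]
    exact ih _ (fun acc y hy => h acc y (by simp [hy]))

theorem pv_foldl_const {α β : Type} (l : List β) (init : α) :
    l.foldl (fun acc _ => acc) init = init := by
  induction l generalizing init with
  | nil => rfl
  | cons x t ih => simp [ih init]

theorem pv_foldl_filter_if {α β : Type} (p : β → Bool) (g : α → β → α) (l : List β) (init : α) :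
    (l.filter p).foldl g init = l.foldl (fun acc x => if p x then g acc x else acc) init := by
  induction l generalizing init with
  | nil => rfl
  | cons x t ih =>
    by_cases h : p x <;> simp [h, ih]

theorem pv_getD_foldl_insert_fn (l : List Int) (f : Int → List Int)
    (d : PySem.Dict Int (List Int)) (k : Int) :
    (l.foldl (fun d b => d.insert b (f b)) d).getD k [] =
      if k ∈ l then f k else d.getD k [] := by
  induction l generalizing d with
  | nil => simp
  | cons b t ih =>
    simp only [List.foldl_cons, ih, PySem.Dict.getD_insert, List.mem_cons]
    by_cases h1 : k ∈ t <;> by_cases h2 : k = b <;> simp [h1, h2]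

-- the filter predicate against the set Rset equals the one against the list R
theorem pv_filter_pred_eq (R : List (Int × Int)) (b : Int) :
    (fun c => decide ((b, c) ∈ PySem.Set.ofList R)) = (fun c => decide ((b, c) ∈ R)) := by
  funext c
  simp [PySem.Set.mem_ofList]

def pvSucc (X : List Int) (R : List (Int × Int)) : PySem.Dict Int (List Int) :=
  X.foldl (fun d b =>
    d.insert b (X.filter (fun c => decide ((b, c) ∈ PySem.Set.ofList R)))) PySem.Dict.empty

theorem pv_succ_getD (X : List Int) (R : List (Int × Int)) (k : Int) (hk : k ∈ X) :
    (pvSucc X R).getD k [] = X.filter (fun c => decide ((k, c) ∈ R)) := by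
  unfold pvSucc
  rw [pv_getD_foldl_insert_fn X (fun b => X.filter (fun c => decide ((b, c) ∈ PySem.Set.ofList R)))]
  rw [if_pos hk, pv_filter_pred_eq]

theorem pv_lists_eq (X : List Int) (R : List (Int × Int)) :
    (X.foldl
      (fun acc a =>
        ((pvSucc X R).getD a []).foldl
          (fun acc b =>
            ((pvSucc X R).getD b []).foldl
              (fun acc c => acc ++ [(a, b), (b, c), (a, c)]) acc)
          acc)
      []) =
    X.foldl (fun acc a =>
      X.foldl (fun acc b =>
        X.foldl (fun acc c =>
          if (a, b) ∈ R ∧ (b, c) ∈ R then acc ++ [(a, b), (b, c), (a, c)] else acc) acc) acc) [] := by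
  apply pv_foldl_congr
  intro acc a ha
  rw [pv_succ_getD X R a ha, pv_foldl_filter_if]
  apply pv_foldl_congr
  intro acc2 b hb
  by_cases hab : (a, b) ∈ R
  · rw [if_pos (by simpa using hab)]
    rw [pv_succ_getD X R b hb, pv_foldl_filter_if]
    apply pv_foldl_congr
    intro acc3 c _
    by_cases hbc : (b, c) ∈ R <;> simp [hab, hbc]
  · rw [if_neg (by simpa using hab)]
    rw [pv_foldl_congr X _ (fun acc _ => acc) acc2
        (fun acc3 c _ => by simp [hab])]
    exact (pv_foldl_const X acc2).symm

-- ===== VERDICT (by name: the statement is the Claim_ definition above) =====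
theorem make_transitive_spec : Claim_equal_make_transitive := by
  intro X R _
  unfold Spec_make_transitive make_transitive make_transitive_alt
  exact congrArg PySem.Set.ofList (pv_lists_eq X R).symm
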